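-- pv_equiv track=rewrite | github.com/RICSecLab/RCABench | feature_extraction/AuroraFE/src/check.py | check_locations
-- ===== SOURCE A (Python) =====
-- def uniq(ls):
--     # preserve order
--     new = []
--     for l in ls:
--         if not l in new:
--             new.append(l)
--     return new
--
-- def check_locations(ranking, locs):
--     # Sample
--     # 0x000055555555eb84 -- rdx min_reg_val_less 0x5555555f1740 -- 0.9949575371549894 -- add rdx, rax (path rank: 0.8621912170574705) //t2p_readwrite_pdf_image_tile at tiff2pdf.c:2911
--
--     # ref
--     # https://github.com/RUB-SysSec/aurora/blob/master/root_cause_analysis/root_cause_analysis/src/addr2line.rs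
--     # Aurora shows only basenames.
--     # Aurora calls addr2line with "-e {} -a 0x{:x} -f -C -s -i -p".
--
--     loc_ranking = [r.split("//")[-1].split()[2] for r in ranking\
--             if (not "inlined by" in r) and ("at" in r.split("//")[-1])]
--     loc_ranking_uniq = uniq(loc_ranking)
--
--     r = None
--     ru = None
--     for loc in locs:
--         loc = loc.replace("\n","")
--         if not loc in loc_ranking:
--             continue
--
--         i = loc_ranking.index(loc)
--         if r is None or i < r:
--             r = i
--
--         j = loc_ranking_uniq.index(loc)
--         if ru is None or j < ru:
--             ru = j
--
--     if r is None:
--         return None, None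
--
--     return (r+1, ru+1)
-- ===== SOURCE B (Python) =====
-- def check_locations(ranking, locs):
--     loc_ranking = [r.split("//")[-1].split()[2] for r in ranking
--             if (not "inlined by" in r) and ("at" in r.split("//")[-1])]
--     locs_set = {l.replace("\n", "") for l in locs}
--     seen = set()
--     for i, x in enumerate(loc_ranking):
--         if x in locs_set:
--             return (i + 1, len(seen) + 1)
--         seen.add(x)
--     return (None, None)
-- ===== Notes on version B (the rewrite author's own statement) =====
-- stated objective: simpler
-- what changed: Instead of scanning locs with repeated list.index lookups into loc_ranking and into a separately built uniq list, B builds a set of cleaned locs once and makes a single early-exit forward pass over loc_ranking maintaining the set of distinct elements seen so far; the first position whose element is in the locs set yields both ranks at once, so the uniq() pass and all .index scans disappear.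
import Mathlib
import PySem

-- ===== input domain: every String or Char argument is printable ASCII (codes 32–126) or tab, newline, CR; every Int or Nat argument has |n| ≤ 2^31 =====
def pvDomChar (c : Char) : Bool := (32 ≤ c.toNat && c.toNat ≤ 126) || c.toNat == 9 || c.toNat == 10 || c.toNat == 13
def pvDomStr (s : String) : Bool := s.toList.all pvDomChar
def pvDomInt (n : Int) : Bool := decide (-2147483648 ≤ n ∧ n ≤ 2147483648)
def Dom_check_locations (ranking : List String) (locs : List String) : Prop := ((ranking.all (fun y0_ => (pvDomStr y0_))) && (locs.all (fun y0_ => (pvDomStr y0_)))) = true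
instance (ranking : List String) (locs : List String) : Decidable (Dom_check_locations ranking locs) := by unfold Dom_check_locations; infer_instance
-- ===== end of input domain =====

-- B replaces locs-driven repeated .index scans and the uniq() pass by one early-exit
-- forward pass over loc_ranking against a set of cleaned locs (objective: simpler).

-- ===== PORT A =====
-- shared by both ports: the loc_ranking comprehension, identical in Source A and Source B
def pvTail (r : String) : String :=
  ((PySem.List.pyGet? ((PySem.Str.split? r "//").getD []) (-1)).getD "")
def pvKeep (r : String) : Bool :=
  (!(PySem.Str.isIn "inlined by" r)) && PySem.Str.isIn "at" (pvTail r)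
-- .split()[2]: exact on Pre_ (index 2 exists); the getD default is never reached there
def pvExtract (r : String) : String :=
  ((PySem.List.pyGet? (PySem.Str.split₀ (pvTail r)) 2).getD "")
def pvLocRanking (ranking : List String) : List String :=
  (ranking.filter pvKeep).map pvExtract

def pvUniq (ls : List String) : List String :=
  ls.foldl (fun new l => if new.contains l then new else new ++ [l]) []

def pvStepA (lr lru : List String) (st : Option Nat × Option Nat) (loc0 : String) :
    Option Nat × Option Nat :=
  let loc := PySem.Str.replace loc0 "\n" ""
  if lr.contains loc then
    let i := (PySem.List.index? lr loc).getD 0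
    let r := match st.1 with
      | none => some i
      | some rv => if i < rv then some i else some rv
    let j := (PySem.List.index? lru loc).getD 0
    let ru := match st.2 with
      | none => some j
      | some ruv => if j < ruv then some j else some ruv
    (r, ru)
  else st

def check_locations (ranking : List String) (locs : List String) : Option Int × Option Int :=
  let lr := pvLocRanking ranking
  let lru := pvUniq lr
  let st := locs.foldl (pvStepA lr lru) (none, none)
  match st.1 with
  | none => (none, none)
  | some rv => (some ((rv : Int) + 1), some (((st.2.getD 0 : Nat) : Int) + 1))

-- ===== PORT B =====
def pvScanB (S : PySem.Set String) : List String → Nat → PySem.Set String → Option Int × Option Int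
  | [], _, _ => (none, none)
  | x :: rest, i, seen =>
    if PySem.Set.contains S x then (some ((i : Int) + 1), some ((seen.length : Int) + 1))
    else pvScanB S rest (i + 1) (PySem.Set.add seen x)

def check_locations_alt (ranking : List String) (locs : List String) : Option Int × Option Int :=
  let lr := pvLocRanking ranking
  let S := PySem.Set.ofList (locs.map (fun l => PySem.Str.replace l "\n" ""))
  pvScanB S lr 0 PySem.Set.empty

-- ===== PRECONDITION & SPEC =====
-- Pre_ excludes exactly the inputs where A raises IndexError: a ranking line kept by the
-- comprehension's condition whose "//"-tail has fewer than 3 whitespace-separated tokens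
-- (then .split()[2] raises; B's identical comprehension raises there too).
def Pre_check_locations (ranking : List String) (locs : List String) : Prop :=
  ∀ r ∈ ranking, pvKeep r = true → 3 ≤ (PySem.Str.split₀ (pvTail r)).length
instance (ranking : List String) (locs : List String) : Decidable (Pre_check_locations ranking locs) := by
  unfold Pre_check_locations; infer_instance

def pvWitness_check_locations : List String × List String :=
  (["x // f at y a.c:1", "inlined by g"], ["a.c:1", "b.c:2\n"])

def Spec_check_locations (ranking : List String) (locs : List String) (out : Option Int × Option Int) : Prop :=
  out = check_locations_alt ranking locs
instance (ranking : List String) (locs : List String) (out : Option Int × Option Int) : Decidable (Spec_check_locations ranking locs out) := by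
  unfold Spec_check_locations; infer_instance

-- ===== CLAIM (what is proved, stated in full; the proofs are below) =====
def Claim_equal_check_locations : Prop := ∀ (ranking : List String) (locs : List String), Dom_check_locations ranking locs → Pre_check_locations ranking locs → Spec_check_locations ranking locs (check_locations ranking locs)

-- ===== LEMMAS AND PROOFS =====

def pvOptMin (o : Option Nat) (i : Nat) : Option Nat :=
  match o with
  | none => some i
  | some r => if i < r then some i else some r

theorem pvUniq_eq_ofList (ls : List String) : pvUniq ls = PySem.Set.ofList ls := by
  rw [PySem.Set.ofList_eq_foldl, pvUniq]
  rfl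

theorem pvStepA_eq (lr lru : List String) (st : Option Nat × Option Nat) (loc0 : String) :
    pvStepA lr lru st loc0 =
      (let loc := PySem.Str.replace loc0 "\n" ""
       if lr.contains loc then
         (pvOptMin st.1 ((PySem.List.index? lr loc).getD 0),
          pvOptMin st.2 ((PySem.List.index? lru loc).getD 0))
       else st) := by
  simp only [pvStepA, pvOptMin]

-- the pair-fold of A's loop splits into two independent folds over the cleaned, matching locs
theorem foldA_split (lr lru : List String) :
    ∀ (ls : List String) (r0 ru0 : Option Nat),
      ls.foldl (pvStepA lr lru) (r0, ru0) =
        (((ls.map (fun l => PySem.Str.replace l "\n" "")).filter (fun c => lr.contains c)).foldl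
            (fun o c => pvOptMin o ((PySem.List.index? lr c).getD 0)) r0,
         ((ls.map (fun l => PySem.Str.replace l "\n" "")).filter (fun c => lr.contains c)).foldl
            (fun o c => pvOptMin o ((PySem.List.index? lru c).getD 0)) ru0) := by
  intro ls
  induction ls with
  | nil => intro r0 ru0; simp
  | cons l t ih =>
    intro r0 ru0
    simp only [List.foldl_cons, List.map_cons, List.filter_cons, pvStepA_eq]
    by_cases h : PySem.Str.replace l "\n" "" ∈ lr
    · simp [List.contains_eq_mem, h, ih]
    · simp [List.contains_eq_mem, h, ih]

theorem foldl_min_eq (k : Nat) :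
    ∀ (t : List Nat) (a : Nat), k ∈ a :: t → (∀ m ∈ a :: t, k ≤ m) → t.foldl min a = k := by
  intro t
  induction t with
  | nil =>
    intro a hmem hle
    simp at hmem; simp [hmem]
  | cons b t ih =>
    intro a hmem hle
    have ha := hle a (by simp)
    have hb := hle b (by simp)
    simp only [List.foldl_cons]
    apply ih
    · rcases List.mem_cons.mp hmem with h | h
      · exact List.mem_cons.mpr (Or.inl (by rw [Nat.min_def]; split <;> omega))
      · rcases List.mem_cons.mp h with h | h
        · exact List.mem_cons.mpr (Or.inl (by rw [Nat.min_def]; split <;> omega))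
        · exact List.mem_cons.mpr (Or.inr h)
    · intro m hm
      rcases List.mem_cons.mp hm with h | h
      · subst h; rw [Nat.min_def]; split <;> omega
      · exact hle m (by simp [h])

theorem foldl_pvOptMin_some (ns : List Nat) :
    ∀ a : Nat, ns.foldl pvOptMin (some a) = some (ns.foldl min a) := by
  induction ns with
  | nil => intro a; simp
  | cons b t ih =>
    intro a
    simp only [List.foldl_cons, pvOptMin]
    rcases Nat.lt_or_ge b a with h | h
    · rw [if_pos h, Nat.min_eq_right (Nat.le_of_lt h)]; exact ih b
    · rw [if_neg (Nat.not_lt.mpr h), Nat.min_eq_left h]; exact ih a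

theorem foldl_pvOptMin_none_eq (ns : List Nat) (k : Nat)
    (hmem : k ∈ ns) (hle : ∀ m ∈ ns, k ≤ m) : ns.foldl pvOptMin none = some k := by
  cases ns with
  | nil => simp at hmem
  | cons a t =>
    simp only [List.foldl_cons]
    show t.foldl pvOptMin (pvOptMin none a) = some k
    simp only [pvOptMin, foldl_pvOptMin_some]
    rw [foldl_min_eq k t a hmem hle]

-- uniq index = number of distinct elements before the first occurrence
theorem index?_update (c : String) :
    ∀ (L : List String) (s : PySem.Set String) (j : Nat), c ∉ s →
      PySem.List.index? L c = some j →
      PySem.List.index? (PySem.Set.update s L) c = some ((PySem.Set.update s (L.take j)).length) := by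
  intro L
  induction L with
  | nil => intro s j _ h; simp [PySem.List.index?_eq_idxOf?] at h
  | cons x xs ih =>
    intro s j hcs h
    by_cases hx : x = c
    · subst hx
      rw [PySem.List.index?_cons_self] at h
      cases h
      have hadd : PySem.Set.add s x = s ++ [x] := by
        show (if s.contains x then s else s ++ [x]) = s ++ [x]
        rw [if_neg]
        simp [List.contains_eq_mem, hcs]
      have hupd : PySem.Set.update s (x :: xs) = PySem.Set.update (s ++ [x]) xs := by
        show PySem.Set.update (PySem.Set.add s x) xs = _
        rw [hadd]
      rw [hupd, PySem.Set.update_eq_append_filter,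
        PySem.List.index?_append_of_mem _ (show x ∈ s ++ [x] by simp),
        PySem.List.index?_append_singleton_self s x hcs]
      rfl
    · rw [PySem.List.index?_cons_of_ne xs hx] at h
      rcases Option.map_eq_some_iff.mp h with ⟨j', hj', rfl⟩
      have hnew : c ∉ PySem.Set.add s x := by
        rw [PySem.Set.mem_add]
        rintro (h | h)
        · exact hcs h
        · exact hx h.symm
      have := ih (PySem.Set.add s x) j' hnew hj'
      show PySem.List.index? (PySem.Set.update (PySem.Set.add s x) xs) c = _
      rw [this]
      rfl

theorem index?_ofList (L : List String) (c : String) (j : Nat)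
    (h : PySem.List.index? L c = some j) :
    PySem.List.index? (PySem.Set.ofList L) c = some ((PySem.Set.ofList (L.take j)).length) := by
  have := index?_update c L PySem.Set.empty j (by simp [PySem.Set.empty]) h
  rw [PySem.Set.ofList_eq_foldl, PySem.Set.ofList_eq_foldl]
  exact this

theorem length_le_update (s : PySem.Set String) (t : List String) :
    s.length ≤ (PySem.Set.update s t).length := by
  rw [PySem.Set.update_eq_append_filter, List.length_append]
  omega

theorem ofList_take_mono (L : List String) (j1 j2 : Nat) (h : j1 ≤ j2) :
    (PySem.Set.ofList (L.take j1)).length ≤ (PySem.Set.ofList (L.take j2)).length := by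
  have : L.take j2 = L.take j1 ++ (L.drop j1).take (j2 - j1) := by
    rw [← List.take_add]; congr 1; omega
  rw [this, PySem.Set.ofList_eq_foldl, PySem.Set.ofList_eq_foldl, List.foldl_append]
  exact length_le_update _ _

-- first-occurrence index of L[k] is exactly k when no earlier element satisfies the predicate
theorem index?_getElem_eq (L : List String) (p : String → Bool) (k : Nat) (hk : k < L.length)
    (hpk : p L[k] = true) (hmin : ∀ j (_ : j < k), p L[j] = false) :
    PySem.List.index? L L[k] = some k := by
  rcases (PySem.List.index?_isSome_iff L L[k]).mpr (List.getElem_mem hk) with h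
  rcases Option.isSome_iff_exists.mp h with ⟨j, hj⟩
  rcases PySem.List.getElem_of_index?_eq_some hj with ⟨hjlt, hje, hfirst⟩
  have hjk : ¬ j < k := fun hlt => by
    have := hmin j hlt; rw [hje] at this; rw [hpk] at this; simp at this
  have hkj : ¬ k < j := fun hlt => (hfirst k hlt) (rfl)
  have : j = k := by omega
  rw [this] at hj; exact hj

-- index of any matching element is ≥ k (the first matching position)
theorem index?_ge_of_match (L : List String) (p : String → Bool) (k : Nat) (c : String) (j : Nat)
    (hc : p c = true) (hj : PySem.List.index? L c = some j)
    (hmin : ∀ i (hi : i < L.length), i < k → p L[i] = false) : k ≤ j := by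
  rcases PySem.List.getElem_of_index?_eq_some hj with ⟨hjlt, hje, _⟩
  by_contra hlt
  have := hmin j hjlt (by omega)
  rw [hje, hc] at this; simp at this

theorem pvScanB_spec (S : PySem.Set String) :
    ∀ (L : List String) (i : Nat) (seen : PySem.Set String),
      pvScanB S L i seen =
        match L.findIdx? (fun x => PySem.Set.contains S x) with
        | none => (none, none)
        | some k => (some ((i : Int) + (k : Int) + 1),
                     some (((PySem.Set.update seen (L.take k)).length : Int) + 1)) := by
  intro L
  induction L with
  | nil => intro i seen; simp [pvScanB]
  | cons x rest ih =>
    intro i seen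
    rw [pvScanB, List.findIdx?_cons]
    by_cases h : PySem.Set.contains S x = true
    · have hm : x ∈ S := by simpa [List.contains_eq_mem] using h
      simp [hm, PySem.Set.update]
    · have hm : ¬ x ∈ S := by simpa [List.contains_eq_mem] using h
      rw [if_neg h, if_neg (by simpa [List.contains_eq_mem] using h), ih]
      cases hf : rest.findIdx? (fun x => PySem.Set.contains S x) with
      | none => simp
      | some k =>
        simp only [Option.map_some]
        rw [Prod.mk.injEq]
        refine ⟨?_, rfl⟩
        congr 1; push_cast; ring

-- ===== main equivalence =====
theorem main_eq (ranking locs : List String) (_ : Pre_check_locations ranking locs) :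
    check_locations ranking locs = check_locations_alt ranking locs := by
  simp only [check_locations, check_locations_alt]
  rw [pvUniq_eq_ofList, foldA_split, pvScanB_spec]
  set lr := pvLocRanking ranking with hlr
  set cs := locs.map (fun l => PySem.Str.replace l "\n" "") with hcs
  set S := PySem.Set.ofList cs with hS
  have hmemS : ∀ c, c ∈ S ↔ c ∈ cs := fun c => PySem.Set.mem_ofList cs c
  cases hf : lr.findIdx? (fun x => PySem.Set.contains S x) with
  | none =>
    have hnone := List.findIdx?_eq_none_iff.mp hf
    have hfilt : cs.filter (fun c => lr.contains c) = [] := by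
      rw [List.filter_eq_nil_iff]
      intro c hc hcl
      have hcL : c ∈ lr := by simpa [List.contains_eq_mem] using hcl
      have := hnone c hcL
      rw [PySem.Set.contains_eq_listContains] at this
      simp [List.contains_eq_mem, (hmemS c).mpr hc] at this
    rw [hfilt]
    rfl
  | some k =>
    rcases List.findIdx?_eq_some_iff_getElem.mp hf with ⟨hk, hpk, hmin⟩
    have hminf : ∀ j (hj : j < lr.length), j < k → (fun x => PySem.Set.contains S x) lr[j] = false := by
      intro j _ hj
      have := hmin j hj; simpa using this
    -- the element at the first matching position
    have hcstar : lr[k] ∈ cs := by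
      have := hpk
      rw [PySem.Set.contains_eq_listContains, List.contains_eq_mem] at this
      simp at this
      exact (hmemS _).mp this
    have hidxstar : PySem.List.index? lr lr[k] = some k :=
      index?_getElem_eq lr _ k hk hpk (fun j hj => hminf j (by omega) hj)
    -- membership of lr[k] in the filtered list
    have hmemM : lr[k] ∈ cs.filter (fun c => lr.contains c) := by
      rw [List.mem_filter]
      exact ⟨hcstar, by simp [List.contains_eq_mem, List.getElem_mem hk]⟩
    have hcontS : ∀ c ∈ cs.filter (fun c => lr.contains c), PySem.Set.contains S c = true := by
      intro c hc
      rw [List.mem_filter] at hc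
      rw [PySem.Set.contains_eq_listContains, List.contains_eq_mem]
      simp [(hmemS c).mpr hc.1]
    -- the r-fold gives k
    have hr : (cs.filter (fun c => lr.contains c)).foldl
        (fun o c => pvOptMin o ((PySem.List.index? lr c).getD 0)) none = some k := by
      have h2 : ((cs.filter (fun c => lr.contains c)).map
            (fun c => (PySem.List.index? lr c).getD 0)).foldl pvOptMin none = some k := by
        apply foldl_pvOptMin_none_eq
        · exact List.mem_map.mpr ⟨lr[k], hmemM, by rw [hidxstar]; rfl⟩
        · intro m hm
          rcases List.mem_map.mp hm with ⟨c, hc, rfl⟩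
          have hcl : c ∈ lr := by
            rw [List.mem_filter] at hc; simpa [List.contains_eq_mem] using hc.2
          rcases Option.isSome_iff_exists.mp ((PySem.List.index?_isSome_iff lr c).mpr hcl) with ⟨j, hj⟩
          rw [hj]; simp
          exact index?_ge_of_match lr _ k c j (hcontS c hc) hj hminf
      rw [List.foldl_map] at h2; exact h2
    -- the ru-fold gives d = |distinct (lr.take k)|
    have hru : (cs.filter (fun c => lr.contains c)).foldl
        (fun o c => pvOptMin o ((PySem.List.index? (PySem.Set.ofList lr) c).getD 0)) none
        = some ((PySem.Set.ofList (lr.take k)).length) := by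
      have h2 : ((cs.filter (fun c => lr.contains c)).map
            (fun c => (PySem.List.index? (PySem.Set.ofList lr) c).getD 0)).foldl pvOptMin none
            = some ((PySem.Set.ofList (lr.take k)).length) := by
        apply foldl_pvOptMin_none_eq
        · refine List.mem_map.mpr ⟨lr[k], hmemM, ?_⟩
          rw [index?_ofList lr lr[k] k hidxstar]; rfl
        · intro m hm
          rcases List.mem_map.mp hm with ⟨c, hc, rfl⟩
          have hcl : c ∈ lr := by
            rw [List.mem_filter] at hc; simpa [List.contains_eq_mem] using hc.2
          rcases Option.isSome_iff_exists.mp ((PySem.List.index?_isSome_iff lr c).mpr hcl) with ⟨j, hj⟩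
          have hkj : k ≤ j := index?_ge_of_match lr _ k c j (hcontS c hc) hj hminf
          rw [index?_ofList lr c j hj]
          simpa using ofList_take_mono lr k j hkj
      rw [List.foldl_map] at h2; exact h2
    rw [hr, hru]
    simp [PySem.Set.ofList_eq_foldl, PySem.Set.update, PySem.Set.empty]

-- ===== VERDICT (by name: the statement is the Claim_ definition above) =====
theorem check_locations_spec : Claim_equal_check_locations := by
  intro ranking locs _ hpre
  exact main_eq ranking locs hpre
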